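-- pv_equiv track=rewrite | github.com/Aimerfan/flowlab | vcs_adapter/base.py | timedelta_str
-- ===== SOURCE A (Python) =====
-- def timedelta_str(seconds: int):
--     """
--     將相差秒數轉換為描述字串
--     """
--     # 時間單位與使用該單位的秒數上限
--     unit_dict = {
--         'second': 60,
--         'minute': 60 * 60,
--         'hour': 60 * 60 * 24,
--         'day': 60 * 60 * 24 * 7,
--         'week': 60 * 60 * 24 * 7 * 4,
--         'month': 60 * 60 * 24 * 30 * 12,
--         'year': None
--     }
--     prev_max = 1
--     for unit, max_sec in unit_dict.items():
--         if unit == 'year' or seconds < max_sec: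
--             redundant = seconds // prev_max
--             plural = 's' if redundant > 1 else ''
--             return f'Updated {redundant} {unit}{plural} ago'
--         else:
--             prev_max = max_sec
-- ===== SOURCE B (Python) =====
-- # Table-driven binary search over constant thresholds instead of A's accumulating loop.
-- _THRESH = [60, 3600, 86400, 604800, 2419200, 31104000]
-- _UNITS = [('second', 1), ('minute', 60), ('hour', 3600), ('day', 86400),
--           ('week', 604800), ('month', 2419200), ('year', 31104000)]
--
--
-- def timedelta_str(seconds: int):
--     """
--     將相差秒數轉換為描述字串
--     """
--     lo, hi = 0, len(_THRESH)
--     while lo < hi: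
--         mid = (lo + hi) // 2
--         if seconds < _THRESH[mid]:
--             hi = mid
--         else:
--             lo = mid + 1
--     unit, div = _UNITS[lo]
--     redundant = seconds // div
--     plural = 's' if redundant > 1 else ''
--     return f'Updated {redundant} {unit}{plural} ago'
-- ===== Notes on version B (the rewrite author's own statement) =====
-- stated objective: alternative
-- what changed: Replaced A's linear dict-items loop that accumulates prev_max with constant parallel tables (thresholds and (unit,divisor) pairs) and a hand-written binary search for the bucket index; same formatting.
import Mathlib
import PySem

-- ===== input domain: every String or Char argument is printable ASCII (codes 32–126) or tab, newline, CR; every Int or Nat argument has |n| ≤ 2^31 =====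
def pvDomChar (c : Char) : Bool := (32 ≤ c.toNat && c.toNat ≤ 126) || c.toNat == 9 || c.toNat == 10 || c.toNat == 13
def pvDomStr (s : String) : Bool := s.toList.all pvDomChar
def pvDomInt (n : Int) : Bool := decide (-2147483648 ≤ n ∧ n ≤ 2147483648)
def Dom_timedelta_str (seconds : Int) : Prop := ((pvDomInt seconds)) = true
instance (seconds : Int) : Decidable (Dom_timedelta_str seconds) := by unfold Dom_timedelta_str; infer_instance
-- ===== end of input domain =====

-- B replaces A's accumulating linear scan over the unit dict with constant threshold/unit
-- tables and a binary search for the bucket (objective: alternative algorithm, same formatting).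

-- ===== PORT A =====
-- A iterates over the unit dict accumulating prev_max; only 'year' has None, and that
-- branch is guarded by unit == "year", so max_sec.getD 0 below is only read when it is some.
def pvUnitDictA : List (String × Option Int) :=
  [("second", some 60), ("minute", some 3600), ("hour", some 86400),
   ("day", some 604800), ("week", some 2419200), ("month", some 31104000),
   ("year", none)]

def pvLoopA (seconds : Int) : Int → List (String × Option Int) → Option String
  | _, [] => none
  | prev_max, (unit, max_sec) :: rest =>
      if unit == "year" || decide (seconds < max_sec.getD 0) then
        let redundant := PySem.Int.floordiv seconds prev_max
        let plural := if redundant > 1 then "s" else ""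
        some ("Updated " ++ PySem.Int.toStr redundant ++ " " ++ unit ++ plural ++ " ago")
      else
        pvLoopA seconds (max_sec.getD 0) rest

-- the Python falls off the loop only if the list were exhausted (never happens: 'year' always fires)
def timedelta_str (seconds : Int) : String :=
  (pvLoopA seconds 1 pvUnitDictA).getD ""

-- ===== PORT B =====
def pvThreshB : List Int := [60, 3600, 86400, 604800, 2419200, 31104000]

def pvUnitsB : List (String × Int) :=
  [("second", 1), ("minute", 60), ("hour", 3600), ("day", 86400),
   ("week", 604800), ("month", 2419200), ("year", 31104000)]

-- B's while-loop binary search, transcribed with (lo, hi) state; the fuel argument only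
-- bounds the iteration count (the loop halves hi - lo, so pvThreshB.length steps suffice)
def pvBsearchB (seconds : Int) : Nat → Nat → Nat → Nat
  | 0, lo, _ => lo
  | fuel + 1, lo, hi =>
      if lo < hi then
        let mid := (lo + hi) / 2
        if seconds < pvThreshB.getD mid 0 then pvBsearchB seconds fuel lo mid
        else pvBsearchB seconds fuel (mid + 1) hi
      else lo

def timedelta_str_alt (seconds : Int) : String :=
  let idx := pvBsearchB seconds pvThreshB.length 0 pvThreshB.length
  let ud := pvUnitsB.getD idx ("", 1)
  let redundant := PySem.Int.floordiv seconds ud.2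
  let plural := if redundant > 1 then "s" else ""
  "Updated " ++ PySem.Int.toStr redundant ++ " " ++ ud.1 ++ plural ++ " ago"

-- ===== PRECONDITION & SPEC =====
def Spec_timedelta_str (seconds : Int) (out : String) : Prop := out = timedelta_str_alt seconds
instance (seconds : Int) (out : String) : Decidable (Spec_timedelta_str seconds out) := by unfold Spec_timedelta_str; infer_instance

-- ===== CLAIM (what is proved, stated in full; the proofs are below) =====
def Claim_equal_timedelta_str : Prop := ∀ (seconds : Int), Dom_timedelta_str seconds → Spec_timedelta_str seconds (timedelta_str seconds)

-- ===== LEMMAS AND PROOFS =====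
lemma pvBsearch_eval (s : Int) :
    pvBsearchB s 6 0 6 =
      if s < 60 then 0 else if s < 3600 then 1 else if s < 86400 then 2
      else if s < 604800 then 3 else if s < 2419200 then 4
      else if s < 31104000 then 5 else 6 := by
  by_cases h1 : s < 60 <;> by_cases h2 : s < 3600 <;> by_cases h3 : s < 86400 <;>
    by_cases h4 : s < 604800 <;> by_cases h5 : s < 2419200 <;> by_cases h6 : s < 31104000 <;>
    first
    | omega
    | simp [pvBsearchB, pvThreshB, h1, h2, h3, h4, h5, h6]

-- ===== VERDICT (by name: the statement is the Claim_ definition above) =====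
theorem timedelta_str_spec : Claim_equal_timedelta_str := by
  intro s _
  unfold Spec_timedelta_str timedelta_str timedelta_str_alt
  rw [show pvThreshB.length = 6 from rfl, pvBsearch_eval]
  by_cases h1 : s < 60 <;> by_cases h2 : s < 3600 <;> by_cases h3 : s < 86400 <;>
    by_cases h4 : s < 604800 <;> by_cases h5 : s < 2419200 <;> by_cases h6 : s < 31104000 <;>
    first
    | omega
    | simp [pvLoopA, pvUnitDictA, pvUnitsB, h1, h2, h3, h4, h5, h6]
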